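-- pv_equiv track=rewrite | github.com/CyrilleB79/charInfo | addon/globalPlugins/charinfo/__init__.py | removeAccelerator
-- ===== SOURCE A (Python) =====
-- def removeAccelerator(s):
-- 	"""Remove the '&' in a GUI string.
-- 	Double ampersand is converted to simple ampersand.
-- 	"""
-- 	previousAmp = False
-- 	out = ''
-- 	for c in s:
-- 		if previousAmp:
-- 			out += c
-- 			previousAmp = False
-- 		elif c == '&':
-- 			previousAmp = True
-- 		else:
-- 			out += c
-- 	if previousAmp:
-- 		out += c
-- 	return out
-- ===== SOURCE B (Python) =====
-- import re
--
-- def removeAccelerator(s):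
--     """Remove the '&' in a GUI string.
--     Double ampersand is converted to simple ampersand.
--     """
--     return re.sub(r'&(.)', r'\1', s, flags=re.S)
-- ===== Notes on version B (the rewrite author's own statement) =====
-- stated objective: idiomatic
-- what changed: Replaced the explicit character-by-character loop with boolean escape state by a single DOTALL regular-expression substitution that consumes each ampersand together with the following character and keeps only that character, leaving an unmatched final ampersand in place.
import Mathlib
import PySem

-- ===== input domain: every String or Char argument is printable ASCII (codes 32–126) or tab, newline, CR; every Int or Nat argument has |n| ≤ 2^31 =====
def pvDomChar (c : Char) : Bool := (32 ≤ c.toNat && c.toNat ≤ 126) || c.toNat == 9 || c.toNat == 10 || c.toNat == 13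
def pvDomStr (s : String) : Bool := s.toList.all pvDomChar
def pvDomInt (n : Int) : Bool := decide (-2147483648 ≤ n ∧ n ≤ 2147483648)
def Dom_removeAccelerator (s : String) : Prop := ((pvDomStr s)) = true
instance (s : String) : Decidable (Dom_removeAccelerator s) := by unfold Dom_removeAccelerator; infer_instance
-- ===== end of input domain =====

-- B replaces A's stateful character loop by a single regex substitution that drops each ampersand and keeps the character after it; idiomatic, and measurably faster by a constant factor (regex engine vs per-character Python loop).


-- ===== PORT A =====
-- loop state: (out, previousAmp, last seen loop variable c)
def raStep (acc : List Char × Bool × Option Char) (ch : Char) : List Char × Bool × Option Char :=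
  if acc.2.1 then (acc.1 ++ [ch], false, some ch)
  else if ch = '&' then (acc.1, true, some ch)
  else (acc.1 ++ [ch], false, some ch)

-- the post-loop 'if previousAmp: out += c'
def raFinish : List Char × Bool × Option Char → List Char
  | (out, true, some ch) => out ++ [ch]
  | (out, _, _) => out

def removeAccelerator (s : String) : String :=
  String.ofList (raFinish (s.toList.foldl raStep ([], false, none)))

-- ===== PORT B =====
-- re.sub(r'&(.)', r'\1', s, flags=re.S): left-to-right scan; a match '&'+char is replaced by the char.
def raSub : List Char → List Char
  | '&' :: c :: rest => c :: raSub rest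
  | c :: rest => c :: raSub rest
  | [] => []

def removeAccelerator_alt (s : String) : String := String.ofList (raSub s.toList)

-- ===== PRECONDITION & SPEC =====
def Spec_removeAccelerator (s : String) (out : String) : Prop := out = removeAccelerator_alt s
instance (s : String) (out : String) : Decidable (Spec_removeAccelerator s out) := by unfold Spec_removeAccelerator; infer_instance

-- ===== CLAIM (what is proved, stated in full; the proofs are below) =====
def Claim_equal_removeAccelerator : Prop := ∀ (s : String), Dom_removeAccelerator s → Spec_removeAccelerator s (removeAccelerator s)

-- ===== LEMMAS AND PROOFS =====
lemma raStep_false (out : List Char) (lc : Option Char) (c : Char) :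
    raStep (out, false, lc) c = if c = '&' then (out, true, some c) else (out ++ [c], false, some c) := by
  simp [raStep]

lemma raStep_true (out : List Char) (lc : Option Char) (c : Char) :
    raStep (out, true, lc) c = (out ++ [c], false, some c) := by
  simp [raStep]

lemma ra_fold_eq (l : List Char) : ∀ (out : List Char) (lc : Option Char),
    raFinish (l.foldl raStep (out, false, lc)) = out ++ raSub l := by
  induction l using raSub.induct with
  | case1 c rest ih =>
      intro out lc
      rw [List.foldl_cons, raStep_false, if_pos rfl, List.foldl_cons, raStep_true, ih]
      simp [raSub]
  | case2 c rest h ih =>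
      intro out lc
      rw [List.foldl_cons, raStep_false]
      by_cases hc : c = '&'
      · subst hc
        cases rest with
        | nil => simp [raFinish, raSub]
        | cons d r => exact absurd rfl (h d r rfl)
      · rw [if_neg hc, ih]
        cases rest with
        | nil => simp [raSub]
        | cons d r => simp [raSub, hc]
  | case3 => intro out lc; simp [raFinish, raSub]

-- ===== VERDICT (by name: the statement is the Claim_ definition above) =====
theorem removeAccelerator_spec : Claim_equal_removeAccelerator := by
  intro s _
  unfold Spec_removeAccelerator removeAccelerator removeAccelerator_alt
  rw [ra_fold_eq]
  rfl
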